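-- pv_equiv track=rewrite | github.com/maykowsm/Game-Python | cobrinha.py | autoColisao
-- ===== SOURCE A (Python) =====
-- def autoColisao(pos_cobrinha, direcao):
-- 	for i in pos_cobrinha:
-- 		cont = 0
-- 		for j in pos_cobrinha:
-- 			if i == j: cont += 1
--
-- 		if cont > 1:
-- 			return True
--
-- 	return False
-- ===== SOURCE B (Python) =====
-- def autoColisao(pos_cobrinha, direcao):
-- 	seen = set()
-- 	for p in pos_cobrinha:
-- 		if p in seen:
-- 			return True
-- 		seen.add(p)
-- 	return False
-- ===== Notes on version B (the rewrite author's own statement) =====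
-- stated objective: faster
-- what changed: Replaced the quadratic all-pairs counting loop (recount every element against the whole list) with a single pass over the list maintaining a set of positions already seen, returning True on the first repeat.
import Mathlib
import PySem

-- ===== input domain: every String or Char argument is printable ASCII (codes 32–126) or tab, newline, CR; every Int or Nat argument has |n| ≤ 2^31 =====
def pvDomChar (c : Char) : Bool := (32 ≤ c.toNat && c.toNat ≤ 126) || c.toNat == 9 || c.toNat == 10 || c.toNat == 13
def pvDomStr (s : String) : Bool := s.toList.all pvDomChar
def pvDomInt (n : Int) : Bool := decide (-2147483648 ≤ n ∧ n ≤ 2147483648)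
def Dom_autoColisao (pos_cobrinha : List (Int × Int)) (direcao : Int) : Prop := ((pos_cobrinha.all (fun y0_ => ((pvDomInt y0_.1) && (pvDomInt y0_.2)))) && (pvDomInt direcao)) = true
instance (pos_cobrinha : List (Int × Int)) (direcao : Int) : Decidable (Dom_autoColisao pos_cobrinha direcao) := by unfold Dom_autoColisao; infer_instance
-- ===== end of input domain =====

-- B replaces A's quadratic recount of every element against the whole list by one
-- pass with a set of positions already seen (objective: faster, O(n^2) -> O(n)).

-- ===== PORT A =====
-- inner loop: cont = 0; for j in pos_cobrinha: if i == j: cont += 1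
def pvCountEq (pos : List (Int × Int)) (i : Int × Int) : Int :=
  pos.foldl (fun cont j => if i == j then cont + 1 else cont) 0

-- outer loop with early return
def pvALoop (pos : List (Int × Int)) : List (Int × Int) → Bool
  | [] => false
  | i :: rest => if pvCountEq pos i > 1 then true else pvALoop pos rest

def autoColisao (pos_cobrinha : List (Int × Int)) (direcao : Int) : Bool :=
  pvALoop pos_cobrinha pos_cobrinha

-- ===== PORT B =====
-- seen = set(); for p in pos_cobrinha: if p in seen: return True; seen.add(p)
def pvBLoop : List (Int × Int) → PySem.Set (Int × Int) → Bool
  | [], _ => false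
  | p :: rest, seen =>
      if PySem.Set.contains seen p then true else pvBLoop rest (PySem.Set.add seen p)

def autoColisao_alt (pos_cobrinha : List (Int × Int)) (direcao : Int) : Bool :=
  pvBLoop pos_cobrinha PySem.Set.empty

-- ===== PRECONDITION & SPEC =====
def Spec_autoColisao (pos_cobrinha : List (Int × Int)) (direcao : Int) (out : Bool) : Prop := out = autoColisao_alt pos_cobrinha direcao
instance (pos_cobrinha : List (Int × Int)) (direcao : Int) (out : Bool) : Decidable (Spec_autoColisao pos_cobrinha direcao out) := by unfold Spec_autoColisao; infer_instance

-- ===== CLAIM (what is proved, stated in full; the proofs are below) =====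
def Claim_equal_autoColisao : Prop := ∀ (pos_cobrinha : List (Int × Int)) (direcao : Int), Dom_autoColisao pos_cobrinha direcao → Spec_autoColisao pos_cobrinha direcao (autoColisao pos_cobrinha direcao)

-- ===== LEMMAS AND PROOFS =====

theorem pvCountEq_go (i : Int × Int) (l : List (Int × Int)) (c : Int) :
    l.foldl (fun cont j => if i == j then cont + 1 else cont) c = c + l.count i := by
  induction l generalizing c with
  | nil => simp
  | cons j t ih =>
      simp only [List.foldl_cons]
      by_cases h : i = j
      · rw [if_pos (by simp [h]), ih, List.count_cons, if_pos (by simp [h])]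
        push_cast; ring
      · rw [if_neg (by simp [h]), ih, List.count_cons, if_neg (by simp [Ne.symm h])]
        simp

theorem pvCountEq_eq (pos : List (Int × Int)) (i : Int × Int) :
    pvCountEq pos i = (pos.count i : Int) := by
  rw [pvCountEq, pvCountEq_go]; simp

theorem pvALoop_eq_any (pos : List (Int × Int)) (rest : List (Int × Int)) :
    pvALoop pos rest = rest.any (fun i => decide (1 < pos.count i)) := by
  induction rest with
  | nil => rfl
  | cons i t ih =>
      simp only [pvALoop, List.any_cons, ih, pvCountEq_eq]
      by_cases h : 1 < pos.count i
      · have : (1 : Int) < (pos.count i : Int) := by exact_mod_cast h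
        simp [this, h]
      · have : ¬ (1 : Int) < (pos.count i : Int) := by exact_mod_cast h
        simp [this, h]

theorem autoColisao_true_iff (pos : List (Int × Int)) (d : Int) :
    autoColisao pos d = true ↔ ¬ pos.Nodup := by
  rw [autoColisao, pvALoop_eq_any, List.nodup_iff_count_le_one]
  simp only [List.any_eq_true, decide_eq_true_eq]
  constructor
  · rintro ⟨i, _, h2⟩ hall
    exact absurd (hall i) (by omega)
  · intro h
    rw [not_forall] at h
    obtain ⟨i, hi⟩ := h
    refine ⟨i, ?_, by omega⟩
    exact List.count_pos_iff.mp (by omega)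

theorem pvBLoop_false_iff (rest : List (Int × Int)) (seen : PySem.Set (Int × Int)) :
    pvBLoop rest seen = false ↔ rest.Nodup ∧ ∀ q ∈ rest, ¬ PySem.Set.contains seen q := by
  induction rest generalizing seen with
  | nil => simp [pvBLoop]
  | cons p t ih =>
      by_cases h : PySem.Set.contains seen p = true
      · simp only [pvBLoop, h, if_pos rfl]
        constructor
        · intro hh; cases hh
        · rintro ⟨_, hall⟩
          exact absurd h (hall p (List.mem_cons_self ..))
      · have h' : PySem.Set.contains seen p = false := by
          cases hc : PySem.Set.contains seen p with
          | true => exact absurd hc h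
          | false => rfl
        simp only [pvBLoop, h', Bool.false_eq_true, if_false]
        rw [ih]
        constructor
        · rintro ⟨hnd, hall⟩
          have hmem : ∀ q ∈ t, (PySem.Set.contains seen q = false) ∧ q ≠ p := by
            intro q hq
            have := hall q hq
            constructor
            · cases hc : PySem.Set.contains seen q with
              | true =>
                  exfalso; apply this
                  simp [PySem.Set.contains, PySem.Set.add] at *
                  simp_all
              | false => rfl
            · intro hqp; subst hqp
              apply this
              simp [PySem.Set.contains, PySem.Set.add]
              split <;> simp_all [PySem.Set.contains]
          refine ⟨?_, ?_⟩
          · refine List.nodup_cons.mpr ⟨?_, hnd⟩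
            intro hp
            exact (hmem p hp).2 rfl
          · intro q hq
            rcases List.mem_cons.mp hq with rfl | hq'
            · simpa using h'
            · simpa using (hmem q hq').1
        · rintro ⟨hnd, hall⟩
          have hnd' := List.nodup_cons.mp hnd
          refine ⟨hnd'.2, ?_⟩
          intro q hq hc
          have hq1 : q ≠ p := fun e => hnd'.1 (e ▸ hq)
          have hq2 := hall q (List.mem_cons_of_mem _ hq)
          simp only [PySem.Set.add] at hc
          revert hc
          split
          · intro hc; exact hq2 (by simpa using hc)
          · intro hc
            simp [PySem.Set.contains] at hc hq2 ⊢
            rcases hc with hc | hc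
            · exact hq2 hc
            · exact hq1 hc

theorem autoColisao_alt_true_iff (pos : List (Int × Int)) (d : Int) :
    autoColisao_alt pos d = true ↔ ¬ pos.Nodup := by
  rw [autoColisao_alt]
  constructor
  · intro h hnd
    have := (pvBLoop_false_iff pos PySem.Set.empty).mpr
      ⟨hnd, by intro q _; simp [PySem.Set.contains, PySem.Set.empty]⟩
    rw [show PySem.Set.empty = ([] : List (Int × Int)) from rfl] at this
    simp [this] at h
  · intro h
    cases hb : pvBLoop pos PySem.Set.empty with
    | true => rfl
    | false => exact absurd ((pvBLoop_false_iff pos PySem.Set.empty).mp hb).1 h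

-- ===== VERDICT (by name: the statement is the Claim_ definition above) =====
theorem autoColisao_spec : Claim_equal_autoColisao := by
  intro pos d _
  unfold Spec_autoColisao
  cases hb : autoColisao_alt pos d with
  | true =>
      exact (autoColisao_true_iff pos d).mpr ((autoColisao_alt_true_iff pos d).mp hb)
  | false =>
      cases ha : autoColisao pos d with
      | false => rfl
      | true =>
          exact absurd ((autoColisao_alt_true_iff pos d).mpr
            ((autoColisao_true_iff pos d).mp ha)) (by simp [hb])
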